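-- pv_equiv track=rewrite | github.com/FischermanCH/A.R.I.A. | aria/core/custom_skills.py | _collect_skill_categories
-- ===== SOURCE A (Python) =====
-- from typing import Any
--
-- SKILL_CATEGORY_DEFAULTS = [
--     "automation",
--     "infrastructure",
--     "communication",
--     "monitoring",
--     "knowledge",
--     "utility",
-- ]
--
-- def _collect_skill_categories(rows: list[dict[str, Any]]) -> list[str]:
--     seen: set[str] = set()
--     merged: list[str] = []
--     for item in SKILL_CATEGORY_DEFAULTS:
--         key = str(item).strip().lower()
--         if key and key not in seen:
--             seen.add(key)
--             merged.append(key)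
--     for row in rows:
--         key = str(row.get("category", "")).strip().lower()
--         if key and key not in seen:
--             seen.add(key)
--             merged.append(key)
--     return merged
-- ===== SOURCE B (Python) =====
-- SKILL_CATEGORY_DEFAULTS = [
--     "automation",
--     "infrastructure",
--     "communication",
--     "monitoring",
--     "knowledge",
--     "utility",
-- ]
--
-- def _collect_skill_categories(rows):
--     keys = [k for k in (str(x).strip().lower()
--             for x in SKILL_CATEGORY_DEFAULTS + [row.get("category", "") for row in rows]) if k]
--
--     def first_only(xs):
--         # keep the head, drop every later copy of it from the rest, recurse
--         if not xs:
--             return []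
--         head = xs[0]
--         return [head] + first_only([x for x in xs[1:] if x != head])
--
--     return first_only(keys)
-- ===== Notes on version B (the rewrite author's own statement) =====
-- stated objective: alternative
-- what changed: Replaces A's single stateful pass with a growing seen-set and append branch by a two-stage design: first build the normalized non-empty key stream, then deduplicate it with a recursive remove-the-rest scheme (keep the head, filter all later copies of it out of the tail, recurse) that keeps no auxiliary seen state at all.
import Mathlib
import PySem

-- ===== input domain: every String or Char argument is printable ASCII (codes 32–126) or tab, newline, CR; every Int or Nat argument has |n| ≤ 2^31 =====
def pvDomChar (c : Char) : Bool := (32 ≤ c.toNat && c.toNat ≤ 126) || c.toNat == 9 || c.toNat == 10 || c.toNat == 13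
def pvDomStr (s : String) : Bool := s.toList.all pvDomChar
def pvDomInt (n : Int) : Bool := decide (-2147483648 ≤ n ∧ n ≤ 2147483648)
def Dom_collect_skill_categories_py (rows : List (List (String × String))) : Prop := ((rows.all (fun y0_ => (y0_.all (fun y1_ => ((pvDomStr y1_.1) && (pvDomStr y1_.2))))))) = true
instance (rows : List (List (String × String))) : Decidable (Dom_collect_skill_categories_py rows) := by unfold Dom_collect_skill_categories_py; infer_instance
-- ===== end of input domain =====

-- B replaces A's stateful seen-set/branch pass by a seen-state-free recursive remove-the-rest dedup
-- over the normalized key stream (alternative decomposition; same results, no speed claim).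
-- All dict values are strings under the type convention, so Python's str(x) is the identity and is not ported.

def SKILL_CATEGORY_DEFAULTS : List String :=
  ["automation", "infrastructure", "communication", "monitoring", "knowledge", "utility"]

-- ===== PORT A =====
-- state = (seen, merged); 'key and key not in seen' is the branch; seen.add / merged.append in lockstep
def collect_skill_categories_py (rows : List (List (String × String))) : List String :=
  let step : (PySem.Set String × List String) → String → (PySem.Set String × List String) :=
    fun st item =>
      let key := PySem.Str.lower (PySem.Str.strip item)
      if key ≠ "" ∧ ¬ (PySem.Set.contains st.1 key = true) then (PySem.Set.add st.1 key, st.2 ++ [key]) else st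
  let st1 := SKILL_CATEGORY_DEFAULTS.foldl step (PySem.Set.empty, [])
  let st2 := rows.foldl (fun st row => step st (PySem.Dict.getD (PySem.Dict.mk row) "category" "")) st1
  st2.2

-- ===== PORT B =====
-- first_only: keep the head, filter every later copy of it out of the tail, recurse (no seen state)
def pvFirstOnly : List String → List String
  | [] => []
  | head :: t => head :: pvFirstOnly (t.filter (fun x => x ≠ head))
termination_by xs => xs.length
decreasing_by
  have h1 : (List.filter (fun x => decide (x.1 ≠ head)) t.attach).length ≤ t.length := by
    simpa using List.length_filter_le _ t.attach
  simpa [List.length_unattach] using Nat.lt_succ_of_le h1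

-- keys = normalized non-empty categories of defaults ++ rows; result = first_only keys
def collect_skill_categories_py_alt (rows : List (List (String × String))) : List String :=
  let keys := ((SKILL_CATEGORY_DEFAULTS ++ rows.map (fun row => PySem.Dict.getD (PySem.Dict.mk row) "category" "")).map
      (fun x => PySem.Str.lower (PySem.Str.strip x))).filter (fun k => k ≠ "")
  pvFirstOnly keys

-- ===== PRECONDITION & SPEC =====
def Spec_collect_skill_categories_py (rows : List (List (String × String))) (out : List String) : Prop := out = collect_skill_categories_py_alt rows
instance (rows : List (List (String × String))) (out : List String) : Decidable (Spec_collect_skill_categories_py rows out) := by unfold Spec_collect_skill_categories_py; infer_instance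

-- ===== CLAIM (what is proved, stated in full; the proofs are below) =====
def Claim_equal_collect_skill_categories_py : Prop := ∀ (rows : List (List (String × String))), Dom_collect_skill_categories_py rows → Spec_collect_skill_categories_py rows (collect_skill_categories_py rows)

-- ===== LEMMAS AND PROOFS =====

-- A's loop keeps seen = merged (as lists); folding its step over any key list from a
-- diagonal state (m, m) lands on the diagonal at the filtered ordered-dedup extension of m.
theorem pvStep_diag {α : Type} (g : α → String) (ks : List α) (m : PySem.Set String) :
    ks.foldl (fun st x =>
        let key := PySem.Str.lower (PySem.Str.strip (g x))
        if key ≠ "" ∧ ¬ (PySem.Set.contains st.1 key = true) then (PySem.Set.add st.1 key, st.2 ++ [key]) else st)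
      (m, m)
    = (((ks.map (fun x => PySem.Str.lower (PySem.Str.strip (g x)))).filter (fun k => k ≠ "")).foldl PySem.Set.add m,
       ((ks.map (fun x => PySem.Str.lower (PySem.Str.strip (g x)))).filter (fun k => k ≠ "")).foldl PySem.Set.add m) := by
  induction ks generalizing m with
  | nil => rfl
  | cons k ks ih =>
    simp only [List.foldl_cons, List.map_cons, List.filter_cons]
    by_cases h0 : PySem.Str.lower (PySem.Str.strip (g k)) = ""
    · rw [if_neg (fun hc => hc.1 h0), if_neg (by simp [h0])]
      exact ih m
    · by_cases h1 : PySem.Set.contains m (PySem.Str.lower (PySem.Str.strip (g k))) = true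
      · rw [if_neg (fun hc => hc.2 h1), if_pos (by simp [h0]), List.foldl_cons,
          PySem.Set.add_of_mem (List.mem_of_elem_eq_true h1)]
        exact ih m
      · rw [if_pos ⟨h0, h1⟩, if_pos (by simp [h0]), List.foldl_cons,
          PySem.Set.add_of_not_mem (fun hm => h1 (List.elem_eq_true_of_mem hm))]
        exact ih _

-- B's recursive remove-the-rest dedup computes exactly the ordered first-occurrence set
theorem pvFilter_ofList (t : List String) (p : String → Bool) :
    (PySem.Set.ofList t).filter p = PySem.Set.ofList (t.filter p) := by
  induction t with
  | nil => rfl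
  | cons y t ih =>
    rw [PySem.Set.ofList_cons, List.filter_cons]
    by_cases hp : p y = true
    · rw [if_pos hp, List.filter_cons_of_pos hp, PySem.Set.ofList_cons, ← ih]
      show _ = y :: List.filter _ ((PySem.Set.ofList t).filter p)
      simp only [PySem.Set.discard, List.filter_filter]
      exact congrArg (y :: ·) (List.filter_congr (fun a _ => Bool.and_comm _ _))
    · rw [if_neg hp, List.filter_cons_of_neg hp, ← ih]
      simp only [PySem.Set.discard, List.filter_filter]
      refine List.filter_congr (fun a _ => ?_)
      by_cases hb : a = y
      · simp [hb, hp]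
      · simp [hb]

theorem pvFirstOnly_eq_ofList (xs : List String) : pvFirstOnly xs = PySem.Set.ofList xs := by
  induction hn : xs.length using Nat.strong_induction_on generalizing xs with
  | _ n ih =>
    cases xs with
    | nil => simp [pvFirstOnly]
    | cons h t =>
      rw [pvFirstOnly, PySem.Set.ofList_cons,
        ih (t.filter (fun x => x ≠ h)).length
          (by simpa [← hn] using Nat.lt_succ_of_le (List.length_filter_le _ t)) _ rfl]
      show _ = h :: List.filter _ (PySem.Set.ofList t)
      rw [pvFilter_ofList]
      have he : (List.filter (fun x => decide (x ≠ h)) t) = List.filter (fun y => !y == h) t :=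
        List.filter_congr (fun a _ => by by_cases hb : a = h <;> simp [hb])
      rw [he]

-- ===== VERDICT (by name: the statement is the Claim_ definition above) =====
theorem collect_skill_categories_py_spec : Claim_equal_collect_skill_categories_py := by
  intro rows _
  show collect_skill_categories_py rows = collect_skill_categories_py_alt rows
  show (rows.foldl (fun st x =>
          let key := PySem.Str.lower (PySem.Str.strip (PySem.Dict.getD (PySem.Dict.mk x) "category" ""))
          if key ≠ "" ∧ ¬ (PySem.Set.contains st.1 key = true) then (PySem.Set.add st.1 key, st.2 ++ [key]) else st)
        (SKILL_CATEGORY_DEFAULTS.foldl (fun st x =>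
          let key := PySem.Str.lower (PySem.Str.strip x)
          if key ≠ "" ∧ ¬ (PySem.Set.contains st.1 key = true) then (PySem.Set.add st.1 key, st.2 ++ [key]) else st)
        ((PySem.Set.empty : PySem.Set String), (PySem.Set.empty : PySem.Set String)))).2
      = collect_skill_categories_py_alt rows
  rw [pvStep_diag (fun s => s) SKILL_CATEGORY_DEFAULTS PySem.Set.empty,
    pvStep_diag (fun row => PySem.Dict.getD (PySem.Dict.mk row) "category" "") rows]
  simp [collect_skill_categories_py_alt, pvFirstOnly_eq_ofList, PySem.Set.ofList_eq_foldl,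
    List.filter_append, List.foldl_append, Function.comp_def, PySem.Set.empty]
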